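-- pv_equiv track=rewrite | github.com/prthmmkhija1/AITravelPlanner | real_activities_api.py | _estimate_duration_cost
-- ===== SOURCE A (Python) =====
-- from typing import Dict, List, Any, Optional
--
-- def _estimate_duration_cost(place_types: List[str]) -> tuple:
--     """Estimate duration and cost based on place types"""
--     if any(t in place_types for t in ['museum', 'tourist_attraction']):
--         return ('2-3 hours', 500)
--     elif any(t in place_types for t in ['amusement_park', 'zoo']):
--         return ('4-6 hours', 1500)
--     elif any(t in place_types for t in ['restaurant', 'food']):
--         return ('1-2 hours', 1000)
--     elif any(t in place_types for t in ['shopping_mall', 'store']):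
--         return ('2-4 hours', 2000)
--     elif any(t in place_types for t in ['park', 'natural_feature']):
--         return ('1-3 hours', 0)
--     else:
--         return ('2 hours', 800)
-- ===== SOURCE B (Python) =====
-- # Inverted index: each keyword maps to (priority rank, result); a single pass over
-- # place_types keeps the lowest-rank hit, so no per-group membership scans remain.
-- _KEYWORD_INFO = {
--     'museum': (0, ('2-3 hours', 500)),
--     'tourist_attraction': (0, ('2-3 hours', 500)),
--     'amusement_park': (1, ('4-6 hours', 1500)),
--     'zoo': (1, ('4-6 hours', 1500)),
--     'restaurant': (2, ('1-2 hours', 1000)),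
--     'food': (2, ('1-2 hours', 1000)),
--     'shopping_mall': (3, ('2-4 hours', 2000)),
--     'store': (3, ('2-4 hours', 2000)),
--     'park': (4, ('1-3 hours', 0)),
--     'natural_feature': (4, ('1-3 hours', 0)),
-- }
--
-- def _estimate_duration_cost(place_types):
--     """Estimate duration and cost based on place types"""
--     best = None
--     for t in place_types:
--         info = _KEYWORD_INFO.get(t)
--         if info is not None and (best is None or info[0] < best[0]):
--             best = info
--     return best[1] if best is not None else ('2 hours', 800)
-- ===== Notes on version B (the rewrite author's own statement) =====
-- stated objective: alternative
-- what changed: Inverts the lookup: instead of A's five membership scans of place_types (one per elif group), B builds a keyword->(priority,result) index and makes one pass over place_types keeping the minimum-priority hit; correct because every keyword of a group carries the same result and the elif order is the priority order.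
import Mathlib
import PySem

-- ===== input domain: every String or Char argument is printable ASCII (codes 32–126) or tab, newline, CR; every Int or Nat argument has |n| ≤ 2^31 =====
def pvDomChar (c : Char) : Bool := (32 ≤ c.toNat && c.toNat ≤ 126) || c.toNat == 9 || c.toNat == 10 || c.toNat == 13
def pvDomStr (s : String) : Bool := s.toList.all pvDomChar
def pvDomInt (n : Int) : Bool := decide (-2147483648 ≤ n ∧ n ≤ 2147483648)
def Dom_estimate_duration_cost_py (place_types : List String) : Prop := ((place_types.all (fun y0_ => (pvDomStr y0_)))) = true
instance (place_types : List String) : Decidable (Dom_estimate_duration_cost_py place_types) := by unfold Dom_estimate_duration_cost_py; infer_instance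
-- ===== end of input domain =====

-- B inverts the lookup: a keyword->(priority,result) index and ONE min-priority pass over
-- place_types replace A's five per-group membership scans (objective: alternative).

-- ===== PORT A =====
-- literal elif cascade: each 'any(t in place_types for t in [...])' is List.any over the literal list
def estimate_duration_cost_py (place_types : List String) : String × Int :=
  if (["museum", "tourist_attraction"].any (fun t => place_types.contains t)) then
    ("2-3 hours", 500)
  else if (["amusement_park", "zoo"].any (fun t => place_types.contains t)) then
    ("4-6 hours", 1500)
  else if (["restaurant", "food"].any (fun t => place_types.contains t)) then
    ("1-2 hours", 1000)
  else if (["shopping_mall", "store"].any (fun t => place_types.contains t)) then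
    ("2-4 hours", 2000)
  else if (["park", "natural_feature"].any (fun t => place_types.contains t)) then
    ("1-3 hours", 0)
  else
    ("2 hours", 800)

-- ===== PORT B =====
-- the module-level _KEYWORD_INFO dict: keyword -> (priority rank, (duration, cost))
def keywordInfo : PySem.Dict String (Int × (String × Int)) :=
  PySem.Dict.ofList
    [ ("museum", (0, ("2-3 hours", 500))),
      ("tourist_attraction", (0, ("2-3 hours", 500))),
      ("amusement_park", (1, ("4-6 hours", 1500))),
      ("zoo", (1, ("4-6 hours", 1500))),
      ("restaurant", (2, ("1-2 hours", 1000))),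
      ("food", (2, ("1-2 hours", 1000))),
      ("shopping_mall", (3, ("2-4 hours", 2000))),
      ("store", (3, ("2-4 hours", 2000))),
      ("park", (4, ("1-3 hours", 0))),
      ("natural_feature", (4, ("1-3 hours", 0))) ]

-- one loop iteration: keep `best` unless the keyword index yields a strictly smaller rank
def bStep (best : Option (Int × (String × Int))) (t : String) : Option (Int × (String × Int)) :=
  match keywordInfo.get? t with
  | none => best
  | some info =>
    match best with
    | none => some info
    | some b => if info.1 < b.1 then some info else best

def estimate_duration_cost_py_alt (place_types : List String) : String × Int :=
  match place_types.foldl bStep none with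
  | some b => b.2
  | none => ("2 hours", 800)

-- ===== PRECONDITION & SPEC =====
def Spec_estimate_duration_cost_py (place_types : List String) (out : String × Int) : Prop := out = estimate_duration_cost_py_alt place_types
instance (place_types : List String) (out : String × Int) : Decidable (Spec_estimate_duration_cost_py place_types out) := by unfold Spec_estimate_duration_cost_py; infer_instance

-- ===== CLAIM (what is proved, stated in full; the proofs are below) =====
def Claim_equal_estimate_duration_cost_py : Prop := ∀ (place_types : List String), Dom_estimate_duration_cost_py place_types → Spec_estimate_duration_cost_py place_types (estimate_duration_cost_py place_types)

-- ===== LEMMAS AND PROOFS =====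

-- left-biased minimum-by-rank on optional hits
def combine (a x : Option (Int × (String × Int))) : Option (Int × (String × Int)) :=
  match x with
  | none => a
  | some info =>
    match a with
    | none => some info
    | some b => if info.1 < b.1 then some info else a

lemma bStep_eq_combine (a : Option (Int × (String × Int))) (t : String) :
    bStep a t = combine a (keywordInfo.get? t) := rfl

lemma combine_none_left (x : Option (Int × (String × Int))) : combine none x = x := by
  cases x <;> rfl

lemma combine_assoc (a b c : Option (Int × (String × Int))) :
    combine (combine a b) c = combine a (combine b c) := by
  rcases a with _ | a
  · rw [combine_none_left, combine_none_left]
  · rcases b with _ | b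
    · cases c <;> rfl
    · rcases c with _ | c
      · rfl
      · by_cases h1 : b.1 < a.1 <;> by_cases h2 : c.1 < b.1 <;> by_cases h3 : c.1 < a.1 <;>
          simp [combine, h1, h2, h3] <;> omega

-- right-nested form of the scan
def foldc : List String → Option (Int × (String × Int))
  | [] => none
  | t :: l => combine (keywordInfo.get? t) (foldc l)

lemma foldl_bStep_eq (l : List String) (a : Option (Int × (String × Int))) :
    l.foldl bStep a = combine a (foldc l) := by
  induction l generalizing a with
  | nil => simp [foldc, combine]
  | cons t l ih =>
    simp only [List.foldl_cons, foldc]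
    rw [ih, bStep_eq_combine, combine_assoc]

-- membership predicates for the five groups
def c0 (l : List String) : Bool := l.contains "museum" || l.contains "tourist_attraction"
def c1 (l : List String) : Bool := l.contains "amusement_park" || l.contains "zoo"
def c2 (l : List String) : Bool := l.contains "restaurant" || l.contains "food"
def c3 (l : List String) : Bool := l.contains "shopping_mall" || l.contains "store"
def c4 (l : List String) : Bool := l.contains "park" || l.contains "natural_feature"

lemma keywordInfo_eq : keywordInfo = PySem.Dict.mk
    [ ("museum", (0, ("2-3 hours", 500))),
      ("tourist_attraction", (0, ("2-3 hours", 500))),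
      ("amusement_park", (1, ("4-6 hours", 1500))),
      ("zoo", (1, ("4-6 hours", 1500))),
      ("restaurant", (2, ("1-2 hours", 1000))),
      ("food", (2, ("1-2 hours", 1000))),
      ("shopping_mall", (3, ("2-4 hours", 2000))),
      ("store", (3, ("2-4 hours", 2000))),
      ("park", (4, ("1-3 hours", 0))),
      ("natural_feature", (4, ("1-3 hours", 0))) ] := by decide

lemma foldc_char (l : List String) :
    foldc l =
      if c0 l then some (0, ("2-3 hours", 500))
      else if c1 l then some (1, ("4-6 hours", 1500))
      else if c2 l then some (2, ("1-2 hours", 1000))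
      else if c3 l then some (3, ("2-4 hours", 2000))
      else if c4 l then some (4, ("1-3 hours", 0))
      else none := by
  induction l with
  | nil => simp [foldc, c0, c1, c2, c3, c4]
  | cons t l ih =>
    have hfold : foldc (t :: l) = combine (keywordInfo.get? t) (foldc l) := rfl
    rw [hfold, ih]
    by_cases h1 : "museum" = t
    · subst h1
      rw [keywordInfo_eq]
      simp only [PySem.Dict.get?_mk_cons, c0, c1, c2, c3, c4, List.contains_cons]
      simp
      split_ifs <;> simp [combine]
    by_cases h2 : "tourist_attraction" = t
    · subst h2
      rw [keywordInfo_eq]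
      simp only [PySem.Dict.get?_mk_cons, c0, c1, c2, c3, c4, List.contains_cons]
      simp
      split_ifs <;> simp [combine]
    by_cases h3 : "amusement_park" = t
    · subst h3
      rw [keywordInfo_eq]
      simp only [PySem.Dict.get?_mk_cons, c0, c1, c2, c3, c4, List.contains_cons]
      simp
      split_ifs <;> simp [combine]
    by_cases h4 : "zoo" = t
    · subst h4
      rw [keywordInfo_eq]
      simp only [PySem.Dict.get?_mk_cons, c0, c1, c2, c3, c4, List.contains_cons]
      simp
      split_ifs <;> simp [combine]
    by_cases h5 : "restaurant" = t
    · subst h5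
      rw [keywordInfo_eq]
      simp only [PySem.Dict.get?_mk_cons, c0, c1, c2, c3, c4, List.contains_cons]
      simp
      split_ifs <;> simp [combine]
    by_cases h6 : "food" = t
    · subst h6
      rw [keywordInfo_eq]
      simp only [PySem.Dict.get?_mk_cons, c0, c1, c2, c3, c4, List.contains_cons]
      simp
      split_ifs <;> simp [combine]
    by_cases h7 : "shopping_mall" = t
    · subst h7
      rw [keywordInfo_eq]
      simp only [PySem.Dict.get?_mk_cons, c0, c1, c2, c3, c4, List.contains_cons]
      simp
      split_ifs <;> simp [combine]
    by_cases h8 : "store" = t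
    · subst h8
      rw [keywordInfo_eq]
      simp only [PySem.Dict.get?_mk_cons, c0, c1, c2, c3, c4, List.contains_cons]
      simp
      split_ifs <;> simp [combine]
    by_cases h9 : "park" = t
    · subst h9
      rw [keywordInfo_eq]
      simp only [PySem.Dict.get?_mk_cons, c0, c1, c2, c3, c4, List.contains_cons]
      simp
      split_ifs <;> simp [combine]
    by_cases h10 : "natural_feature" = t
    · subst h10
      rw [keywordInfo_eq]
      simp only [PySem.Dict.get?_mk_cons, c0, c1, c2, c3, c4, List.contains_cons]
      simp
      split_ifs <;> simp [combine]
    rw [keywordInfo_eq]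
    simp only [PySem.Dict.get?_mk_cons, c0, c1, c2, c3, c4, List.contains_cons]
    simp [PySem.Dict.get?, combine_none_left, h1, h2, h3, h4, h5, h6, h7, h8, h9, h10]

theorem estimate_duration_cost_py_eq (l : List String) :
    estimate_duration_cost_py l = estimate_duration_cost_py_alt l := by
  unfold estimate_duration_cost_py estimate_duration_cost_py_alt
  rw [foldl_bStep_eq, foldc_char]
  simp only [combine, c0, c1, c2, c3, c4, List.any_cons, List.any_nil, Bool.or_false]
  split_ifs <;> simp_all

-- ===== VERDICT (by name: the statement is the Claim_ definition above) =====
theorem estimate_duration_cost_py_spec : Claim_equal_estimate_duration_cost_py := by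
  intro l _
  unfold Spec_estimate_duration_cost_py
  exact estimate_duration_cost_py_eq l
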